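-- pv_equiv track=rewrite | github.com/jerbarnes/semeval22_structured_sentiment | baselines/graph_parser/data_utils.py | create_sentiment_dict
-- ===== SOURCE A (Python) =====
-- def create_sentiment_dict(labels, setup="point_to_root", inside_label=False):
--     """
--     point_to_root: the final token of the sentiment expression is set as the root and all other labels point to this
--
--     head_first: the first token in the sentiment expression is the root, and the for the holder and target expressions, the first token connects to the root, while the other tokens connect to the first
--
--     head final: the final token in the sentiment expression is the root, and the for the holder and target expressions, the final token connects to the root, while the other tokens connect to the final
--     """
--     sent_dict = {}
--     #
--     # associate each label with its token_id
--     enum_labels = [(i + 1, l) for i, l in enumerate(labels)]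
--     #
--     if setup in ["point_to_root", "head_final"]:
--         enum_labels = list(reversed(enum_labels))
--     #
--     #for token_id, label in reversed(enum_labels):
--     for token_id, label in enum_labels:
--         if "exp" in label:
--             sent_dict[token_id] = "0:{0}".format(label)
--             exp_root_id = token_id
--             break
--     #
--     # point_to_root: point to exp_root_id, regardless of expression type
--     if setup == "point_to_root":
--         for token_id, label in enum_labels:
--             if label == "O":
--                 sent_dict[token_id] = "_"
--             else:
--                 if token_id not in sent_dict.keys():
--                     sent_dict[token_id] = "{0}:{1}".format(exp_root_id, label)
--     # head_first or head_final: first/final point to exp_root, others point inside expression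
--     else:
--         for token_id, label in enum_labels:
--             if "targ" in label:
--                 sent_dict[token_id] = "{0}:{1}".format(exp_root_id, label)
--                 targ_root_id = token_id
--                 break
--         #
--         for token_id, label in enum_labels:
--             if "holder" in label:
--                 sent_dict[token_id] = "{0}:{1}".format(exp_root_id, label)
--                 holder_root_id = token_id
--                 break
--         #
--         # set other leafs to point to root
--         for token_id, label in enum_labels:
--             if label == "O":
--                 sent_dict[token_id] = "_"
--             else:
--                 if token_id not in sent_dict.keys():
--                     if inside_label:
--                         label = "IN:" + label
--                     if "exp" in label:
--                         sent_dict[token_id] = "{0}:{1}".format(exp_root_id, label)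
--                     elif "targ" in label:
--                         sent_dict[token_id] = "{0}:{1}".format(targ_root_id, label)
--                     elif "holder" in label:
--                         sent_dict[token_id] = "{0}:{1}".format(holder_root_id, label)
--     return sent_dict
-- ===== SOURCE B (Python) =====
-- def create_sentiment_dict(labels, setup="point_to_root", inside_label=False):
--     rev = setup in ("point_to_root", "head_final")
--     # one backward pass builds both the first- and last-occurrence anchor per category
--     first, last = {}, {}
--     for i, lab in reversed(list(enumerate(labels))):
--         for key in ("exp", "targ", "holder"):
--             if key in lab:
--                 first[key] = (i + 1, lab)
--                 last.setdefault(key, (i + 1, lab))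
--     root = last if rev else first
--     exp = root.get("exp")
--     rd = {}
--     if exp:
--         rd[exp[0]] = "0:" + exp[1]
--     if setup == "point_to_root":
--         def val(lab):
--             return "_" if lab == "O" else "{0}:{1}".format(exp[0], lab)
--     else:
--         targ, holder = root.get("targ"), root.get("holder")
--         for r in (targ, holder):
--             if r:
--                 rd[r[0]] = "{0}:{1}".format(exp[0], r[1])
--         def val(lab):
--             if lab == "O":
--                 return "_"
--             ll = "IN:" + lab if inside_label else lab
--             for key, r in (("exp", exp), ("targ", targ), ("holder", holder)):
--                 if key in ll and r:
--                     return "{0}:{1}".format(r[0], ll)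
--             return None
--     others = [(i + 1, val(lab)) for i, lab in enumerate(labels)
--               if (i + 1) not in rd and val(lab) is not None]
--     if rev:
--         others.reverse()
--     return dict(list(rd.items()) + others)
-- ===== Notes on version B (the rewrite author's own statement) =====
-- stated objective: alternative
-- what changed: A reverses the enumerated list and runs three separate first-match break-scans plus an assignment loop that mutates a dict guarded by membership tests; B makes one backward pass that builds first- and last-occurrence anchors for all three categories at once, picks the roots from them, and produces the remaining entries with a pure per-token value function in a filter/map comprehension (reversed at the end when needed), building the dict once from the assembled list.
import Mathlib
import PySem

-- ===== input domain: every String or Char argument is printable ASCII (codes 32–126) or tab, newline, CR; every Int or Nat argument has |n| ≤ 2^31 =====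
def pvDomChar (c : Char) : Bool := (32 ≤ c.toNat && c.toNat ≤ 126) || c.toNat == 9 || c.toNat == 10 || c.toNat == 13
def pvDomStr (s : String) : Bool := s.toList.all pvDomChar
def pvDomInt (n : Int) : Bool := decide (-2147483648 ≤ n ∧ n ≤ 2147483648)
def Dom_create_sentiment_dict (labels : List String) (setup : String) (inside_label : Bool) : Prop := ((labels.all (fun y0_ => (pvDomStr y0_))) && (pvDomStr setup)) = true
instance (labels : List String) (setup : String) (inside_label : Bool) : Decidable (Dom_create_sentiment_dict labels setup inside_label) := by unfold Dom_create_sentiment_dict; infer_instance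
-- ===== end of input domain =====

-- B replaces A's reversed list plus three break-scans plus a dict-membership-mutating loop by ONE
-- backward pass that builds first/last anchors per category, a pure per-token value function and a
-- filter/map comprehension; objective: alternative decomposition (same cost).

-- ===== PORT A =====
-- "{0}:{1}".format(root_id, label); `none` is the case where Python's root variable is unbound and A
-- raises NameError — those inputs are excluded by Pre_, the value produced here is never claimed.
def pvFmtO (r : Option Int) (l : String) : String :=
  (match r with | some i => PySem.Int.toStr i | none => "") ++ ":" ++ l

-- first loop: for token_id, label in enum_labels: if "exp" in label: d[t] = "0:"+label; break
def pvExpLoop : List (Int × String) → PySem.Dict Int String → PySem.Dict Int String × Option Int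
  | [], d => (d, none)
  | (i, l) :: rest, d =>
      if PySem.Str.isIn "exp" l then (d.insert i ("0:" ++ l), some i)
      else pvExpLoop rest d

def pvTargLoop (expR : Option Int) : List (Int × String) → PySem.Dict Int String → PySem.Dict Int String × Option Int
  | [], d => (d, none)
  | (i, l) :: rest, d =>
      if PySem.Str.isIn "targ" l then (d.insert i (pvFmtO expR l), some i)
      else pvTargLoop expR rest d

def pvHolderLoop (expR : Option Int) : List (Int × String) → PySem.Dict Int String → PySem.Dict Int String × Option Int
  | [], d => (d, none)
  | (i, l) :: rest, d =>
      if PySem.Str.isIn "holder" l then (d.insert i (pvFmtO expR l), some i)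
      else pvHolderLoop expR rest d

-- the point_to_root assignment loop
def pvPtrLoop (expR : Option Int) : List (Int × String) → PySem.Dict Int String → PySem.Dict Int String
  | [], d => d
  | (i, l) :: rest, d =>
      if l == "O" then pvPtrLoop expR rest (d.insert i "_")
      else if d.contains i then pvPtrLoop expR rest d
      else pvPtrLoop expR rest (d.insert i (pvFmtO expR l))

-- the head_first/head_final assignment loop
def pvHeadLoop (expR targR holdR : Option Int) (ins : Bool) : List (Int × String) → PySem.Dict Int String → PySem.Dict Int String
  | [], d => d
  | (i, l) :: rest, d =>
      if l == "O" then pvHeadLoop expR targR holdR ins rest (d.insert i "_")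
      else if d.contains i then pvHeadLoop expR targR holdR ins rest d
      else
        let ll := if ins then "IN:" ++ l else l
        if PySem.Str.isIn "exp" ll then pvHeadLoop expR targR holdR ins rest (d.insert i (pvFmtO expR ll))
        else if PySem.Str.isIn "targ" ll then pvHeadLoop expR targR holdR ins rest (d.insert i (pvFmtO targR ll))
        else if PySem.Str.isIn "holder" ll then pvHeadLoop expR targR holdR ins rest (d.insert i (pvFmtO holdR ll))
        else pvHeadLoop expR targR holdR ins rest d

def create_sentiment_dict (labels : List String) (setup : String) (inside_label : Bool) : List (Int × String) :=
  let enum0 := (PySem.List.enumerate labels).map (fun p => (p.1 + 1, p.2))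
  let enum := if setup == "point_to_root" || setup == "head_final" then enum0.reverse else enum0
  let r1 := pvExpLoop enum PySem.Dict.empty
  if setup == "point_to_root" then (pvPtrLoop r1.2 enum r1.1).items
  else
    let r2 := pvTargLoop r1.2 enum r1.1
    let r3 := pvHolderLoop r1.2 enum r2.1
    (pvHeadLoop r1.2 r2.2 r3.2 inside_label enum r3.1).items

-- ===== PORT B =====
-- "{0}:{1}".format(root[0], label); `none` is where Source B subscripts None and raises — outside Pre_.
def pvFmtP (r : Option (Int × String)) (l : String) : String :=
  (match r with | some p => PySem.Int.toStr p.1 | none => "") ++ ":" ++ l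

-- one step of the single backward pass: try the three category keys on this token
def pvAnchorStep (st : PySem.Dict String (Int × String) × PySem.Dict String (Int × String))
    (p : Int × String) : PySem.Dict String (Int × String) × PySem.Dict String (Int × String) :=
  ["exp", "targ", "holder"].foldl
    (fun st key =>
      if PySem.Str.isIn key p.2 then (st.1.insert key p, st.2.setdefault key p) else st) st

-- rd after `if exp: rd[exp[0]] = "0:" + exp[1]`
def pvExpDict (expP : Option (Int × String)) : PySem.Dict Int String :=
  match expP with
  | none => PySem.Dict.empty
  | some p => PySem.Dict.empty.insert p.1 ("0:" ++ p.2)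

-- rd after the `for r in (targ, holder): if r: rd[r[0]] = ...` loop
def pvRootsDict (expP targP holdP : Option (Int × String)) : PySem.Dict Int String :=
  [targP, holdP].foldl
    (fun d r => match r with | none => d | some p => d.insert p.1 (pvFmtP expP p.2))
    (pvExpDict expP)

-- val() of the point_to_root branch
def pvValPtr (expP : Option (Int × String)) (lab : String) : Option String :=
  some (if lab == "O" then "_" else pvFmtP expP lab)

-- val() of the head_first/head_final branch (the 3-tuple loop of Source B, unrolled)
def pvValHead (expP targP holdP : Option (Int × String)) (ins : Bool) (lab : String) : Option String :=
  if lab == "O" then some "_"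
  else
    let ll := if ins then "IN:" ++ lab else lab
    if PySem.Str.isIn "exp" ll && expP.isSome then some (pvFmtP expP ll)
    else if PySem.Str.isIn "targ" ll && targP.isSome then some (pvFmtP targP ll)
    else if PySem.Str.isIn "holder" ll && holdP.isSome then some (pvFmtP holdP ll)
    else none

def create_sentiment_dict_alt (labels : List String) (setup : String) (inside_label : Bool) : List (Int × String) :=
  let rev := setup == "point_to_root" || setup == "head_final"
  let enum0 := (PySem.List.enumerate labels).map (fun p => (p.1 + 1, p.2))
  let anchors := enum0.reverse.foldl pvAnchorStep (PySem.Dict.empty, PySem.Dict.empty)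
  let root := if rev then anchors.2 else anchors.1
  let expP := root.get? "exp"
  if setup == "point_to_root" then
    let rd := pvExpDict expP
    let others0 := enum0.filterMap (fun p =>
      if rd.contains p.1 then none else (pvValPtr expP p.2).map (fun v => (p.1, v)))
    let others := if rev then others0.reverse else others0
    ((rd.items ++ others).foldl (fun d p => d.insert p.1 p.2) PySem.Dict.empty).items
  else
    let targP := root.get? "targ"
    let holdP := root.get? "holder"
    let rd := pvRootsDict expP targP holdP
    let others0 := enum0.filterMap (fun p =>
      if rd.contains p.1 then none else (pvValHead expP targP holdP inside_label p.2).map (fun v => (p.1, v)))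
    let others := if rev then others0.reverse else others0
    ((rd.items ++ others).foldl (fun d p => d.insert p.1 p.2) PySem.Dict.empty).items

-- ===== PRECONDITION & SPEC =====
-- Pre_ excludes exactly the inputs on which the Python A raises NameError (an unbound root id):
-- no label contains "exp" while some label still needs a root (any non-"O" label for
-- point_to_root, any label containing "targ" or "holder" otherwise).
def Pre_create_sentiment_dict (labels : List String) (setup : String) (inside_label : Bool) : Prop :=
  (∃ l ∈ labels, PySem.Str.isIn "exp" l = true) ∨
  (if setup = "point_to_root" then ∀ l ∈ labels, l = "O"
   else ∀ l ∈ labels, PySem.Str.isIn "targ" l = false ∧ PySem.Str.isIn "holder" l = false)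
instance (labels : List String) (setup : String) (inside_label : Bool) : Decidable (Pre_create_sentiment_dict labels setup inside_label) := by unfold Pre_create_sentiment_dict; infer_instance

def pvWitness_create_sentiment_dict : List String × String × Bool := (["B-targ", "O", "B-exp", "I-exp"], "point_to_root", false)

def Spec_create_sentiment_dict (labels : List String) (setup : String) (inside_label : Bool) (out : List (Int × String)) : Prop := out = create_sentiment_dict_alt labels setup inside_label
instance (labels : List String) (setup : String) (inside_label : Bool) (out : List (Int × String)) : Decidable (Spec_create_sentiment_dict labels setup inside_label out) := by unfold Spec_create_sentiment_dict; infer_instance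

-- ===== CLAIM (what is proved, stated in full; the proofs are below) =====
def Claim_equal_create_sentiment_dict : Prop := ∀ (labels : List String) (setup : String) (inside_label : Bool), Dom_create_sentiment_dict labels setup inside_label → Pre_create_sentiment_dict labels setup inside_label → Spec_create_sentiment_dict labels setup inside_label (create_sentiment_dict labels setup inside_label)

-- ===== LEMMAS AND PROOFS =====

-- first (token, label) of e whose label contains key = A's break-scan result
def pvAltFirst (key : String) (e : List (Int × String)) : Option (Int × String) :=
  e.find? (fun p => PySem.Str.isIn key p.2)

lemma pvFmt_map (r : Option (Int × String)) (l : String) :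
    pvFmtO (r.map Prod.fst) l = pvFmtP r l := by
  cases r <;> rfl

lemma pvFstInj {e : List (Int × String)} (hnd : (e.map Prod.fst).Nodup)
    {p q : Int × String} (hp : p ∈ e) (hq : q ∈ e) (h : p.1 = q.1) : p = q := by
  exact List.inj_on_of_nodup_map hnd hp hq h

-- root pair/id correspondence under unique token ids
lemma pvBeqRoot {e : List (Int × String)} (hnd : (e.map Prod.fst).Nodup)
    {p q : Int × String} (hp : p ∈ e) (hq : q ∈ e) :
    (p.1 == q.1) = ((some q : Option (Int × String)) == some p) := by
  by_cases h : p = q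
  · subst h; simp
  · have h1 : p.1 ≠ q.1 := fun hh => h (pvFstInj hnd hp hq hh)
    have h2 : q ≠ p := fun hh => h hh.symm
    simp [h1, h2]

-- ---- the anchor pass computes first/last matches ----

lemma pv_get?_setdefault_of_ne (d : PySem.Dict String (Int × String)) (k k' : String)
    (v : Int × String) (h : k' ≠ k) : (d.setdefault k v).get? k' = d.get? k' := by
  by_cases hc : d.contains k = true
  · rw [PySem.Dict.setdefault_of_contains d v hc]
  · rw [PySem.Dict.setdefault_of_not_contains d v (by simpa using hc),
      PySem.Dict.get?_insert_of_ne d v h]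

lemma pv_get?_setdefault_self (d : PySem.Dict String (Int × String)) (k : String)
    (v : Int × String) : (d.setdefault k v).get? k = (d.get? k).or (some v) := by
  rw [PySem.Dict.get?_setdefault_self d k v]
  cases d.get? k <;> rfl

lemma pvAnchorStep_get (st : PySem.Dict String (Int × String) × PySem.Dict String (Int × String))
    (p : Int × String) (k : String) (hk : k = "exp" ∨ k = "targ" ∨ k = "holder") :
    (pvAnchorStep st p).1.get? k = (if PySem.Str.isIn k p.2 then some p else st.1.get? k)
    ∧ (pvAnchorStep st p).2.get? k
        = ((st.2.get? k).or (if PySem.Str.isIn k p.2 then some p else none)) := by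
  rcases hk with h | h | h <;> subst h <;>
    simp only [pvAnchorStep, List.foldl] <;>
    split_ifs with h1 h2 h3 <;>
    constructor <;>
    simp [PySem.Dict.get?_insert, pv_get?_setdefault_of_ne, pv_get?_setdefault_self] <;>
    cases st.2.get? "exp" <;> cases st.2.get? "targ" <;> cases st.2.get? "holder" <;> simp

lemma pvAnchorFold_get (k : String) (hk : k = "exp" ∨ k = "targ" ∨ k = "holder") :
    ∀ (r : List (Int × String)) (st : PySem.Dict String (Int × String) × PySem.Dict String (Int × String)),
      (r.foldl pvAnchorStep st).1.get? k
          = ((r.reverse.find? (fun p => PySem.Str.isIn k p.2)).or (st.1.get? k))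
      ∧ (r.foldl pvAnchorStep st).2.get? k
          = ((st.2.get? k).or (r.find? (fun p => PySem.Str.isIn k p.2))) := by
  intro r
  induction r with
  | nil => intro st; simp
  | cons p rest ih =>
    intro st
    obtain ⟨ih1, ih2⟩ := ih (pvAnchorStep st p)
    obtain ⟨hs1, hs2⟩ := pvAnchorStep_get st p k hk
    constructor
    · rw [List.foldl_cons, ih1, hs1, List.reverse_cons, List.find?_append]
      cases h : PySem.Str.isIn k p.2 with
      | true =>
        rw [if_pos rfl, List.find?_cons_of_pos (by simpa using h),
          Option.or_assoc, Option.some_or]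
      | false =>
        rw [if_neg (by simp), List.find?_cons_of_neg (by simpa using h), List.find?_nil,
          Option.or_none]
    · rw [List.foldl_cons, ih2, hs2]
      cases h : PySem.Str.isIn k p.2 with
      | true =>
        rw [if_pos rfl, List.find?_cons_of_pos (by simpa using h),
          Option.or_assoc, Option.some_or]
      | false =>
        rw [if_neg (by simp), List.find?_cons_of_neg (by simpa using h), Option.or_none]

lemma pvAnchors_first (k : String) (hk : k = "exp" ∨ k = "targ" ∨ k = "holder")
    (e0 : List (Int × String)) :
    (e0.reverse.foldl pvAnchorStep (PySem.Dict.empty, PySem.Dict.empty)).1.get? k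
      = pvAltFirst k e0 := by
  rw [(pvAnchorFold_get k hk e0.reverse _).1]
  simp [pvAltFirst]

lemma pvAnchors_last (k : String) (hk : k = "exp" ∨ k = "targ" ∨ k = "holder")
    (e0 : List (Int × String)) :
    (e0.reverse.foldl pvAnchorStep (PySem.Dict.empty, PySem.Dict.empty)).2.get? k
      = pvAltFirst k e0.reverse := by
  rw [(pvAnchorFold_get k hk e0.reverse _).2]
  simp [pvAltFirst]

-- ---- A's break-loops are find? ----

lemma pvExpLoop_eq : ∀ (e : List (Int × String)) (d : PySem.Dict Int String),
    pvExpLoop e d = (match pvAltFirst "exp" e with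
      | none => (d, none)
      | some p => (d.insert p.1 ("0:" ++ p.2), some p.1)) := by
  intro e
  induction e with
  | nil => intro d; simp [pvExpLoop, pvAltFirst]
  | cons p rest ih =>
    intro d
    obtain ⟨i, l⟩ := p
    simp only [pvExpLoop, pvAltFirst]
    by_cases h : PySem.Str.isIn "exp" l = true
    · rw [List.find?_cons_of_pos (by simpa using h), if_pos h]
    · rw [List.find?_cons_of_neg (by simpa using h), if_neg h]
      exact ih d

lemma pvTargLoop_eq (expR : Option Int) : ∀ (e : List (Int × String)) (d : PySem.Dict Int String),
    pvTargLoop expR e d = (match pvAltFirst "targ" e with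
      | none => (d, none)
      | some p => (d.insert p.1 (pvFmtO expR p.2), some p.1)) := by
  intro e
  induction e with
  | nil => intro d; simp [pvTargLoop, pvAltFirst]
  | cons p rest ih =>
    intro d
    obtain ⟨i, l⟩ := p
    simp only [pvTargLoop, pvAltFirst]
    by_cases h : PySem.Str.isIn "targ" l = true
    · rw [List.find?_cons_of_pos (by simpa using h), if_pos h]
    · rw [List.find?_cons_of_neg (by simpa using h), if_neg h]
      exact ih d

lemma pvHolderLoop_eq (expR : Option Int) : ∀ (e : List (Int × String)) (d : PySem.Dict Int String),
    pvHolderLoop expR e d = (match pvAltFirst "holder" e with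
      | none => (d, none)
      | some p => (d.insert p.1 (pvFmtO expR p.2), some p.1)) := by
  intro e
  induction e with
  | nil => intro d; simp [pvHolderLoop, pvAltFirst]
  | cons p rest ih =>
    intro d
    obtain ⟨i, l⟩ := p
    simp only [pvHolderLoop, pvAltFirst]
    by_cases h : PySem.Str.isIn "holder" l = true
    · rw [List.find?_cons_of_pos (by simpa using h), if_pos h]
    · rw [List.find?_cons_of_neg (by simpa using h), if_neg h]
      exact ih d

-- "IN:" contributes no occurrence of the three keys
lemma pvIsIn_cons (k : Char) (sub : List Char) (a : Char) (cs : List Char) (h : k ≠ a) :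
    PySem.Chars.isIn (k :: sub) (a :: cs) = PySem.Chars.isIn (k :: sub) cs := by
  rw [Bool.eq_iff_iff, PySem.Chars.isIn_iff_infix, PySem.Chars.isIn_iff_infix, List.infix_cons_iff]
  constructor
  · rintro (hp | hi)
    · rw [List.cons_prefix_cons] at hp
      exact absurd hp.1 h
    · exact hi
  · intro hi; exact Or.inr hi

lemma pvIsIn_IN (key l : String) (hk : key = "exp" ∨ key = "targ" ∨ key = "holder") :
    PySem.Str.isIn key ("IN:" ++ l) = PySem.Str.isIn key l := by
  rcases hk with h | h | h <;> subst h <;>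
    simp only [PySem.Str.isIn_eq] <;>
    rw [show ("IN:" ++ l).toList = 'I' :: 'N' :: ':' :: l.toList by simp]
  · rw [show ("exp" : String).toList = ['e', 'x', 'p'] by decide]
    rw [pvIsIn_cons _ _ _ _ (by decide), pvIsIn_cons _ _ _ _ (by decide),
        pvIsIn_cons _ _ _ _ (by decide)]
  · rw [show ("targ" : String).toList = ['t', 'a', 'r', 'g'] by decide]
    rw [pvIsIn_cons _ _ _ _ (by decide), pvIsIn_cons _ _ _ _ (by decide),
        pvIsIn_cons _ _ _ _ (by decide)]
  · rw [show ("holder" : String).toList = ['h', 'o', 'l', 'd', 'e', 'r'] by decide]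
    rw [pvIsIn_cons _ _ _ _ (by decide), pvIsIn_cons _ _ _ _ (by decide),
        pvIsIn_cons _ _ _ _ (by decide)]

lemma pvFirst_none {e : List (Int × String)} {key : String} (hf : pvAltFirst key e = none)
    (hk : key = "exp" ∨ key = "targ" ∨ key = "holder") (ins : Bool) :
    ∀ p ∈ e, PySem.Str.isIn key (if ins then "IN:" ++ p.2 else p.2) = false := by
  intro p hp
  have h0 : PySem.Str.isIn key p.2 = false := by
    have := List.find?_eq_none.mp hf p hp
    simpa using this
  cases ins
  · simpa using h0
  · rw [if_pos rfl, pvIsIn_IN key p.2 hk]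
    exact h0

-- ---- A's assignment loops are filterMap-then-insert-fold ----

-- main loop lemma, point_to_root branch
lemma pvPtrLoop_eq (expP : Option (Int × String)) :
    ∀ (e : List (Int × String)) (d : PySem.Dict Int String),
      (e.map Prod.fst).Nodup →
      (∀ p ∈ e, d.contains p.1 = (expP == some p)) →
      (∀ p ∈ e, (expP == some p) = true → p.2 ≠ "O") →
      pvPtrLoop (expP.map Prod.fst) e d
        = (e.filterMap (fun p =>
            if expP == some p then none else (pvValPtr expP p.2).map (fun v => (p.1, v)))).foldl
            (fun d p => d.insert p.1 p.2) d := by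
  intro e
  induction e with
  | nil => intro d _ _ _; simp [pvPtrLoop]
  | cons p rest ih =>
    intro d hnd hcont hO
    obtain ⟨i, l⟩ := p
    have hnd' : (rest.map Prod.fst).Nodup := (List.nodup_cons.mp (by simpa using hnd)).2
    have hi : (i : Int) ∉ rest.map Prod.fst := (List.nodup_cons.mp (by simpa using hnd)).1
    by_cases hsk : expP == some (i, l)
    · have hl : l ≠ "O" := hO (i, l) List.mem_cons_self hsk
      have hlO : (l == "O") = false := by simpa using hl
      have hc : d.contains i = true := by
        rw [hcont (i, l) List.mem_cons_self]; exact hsk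
      simp only [pvPtrLoop, List.filterMap_cons, hsk, hlO, hc, Bool.false_eq_true, if_false, if_true]
      exact ih d hnd' (fun q hq => hcont q (List.mem_cons_of_mem _ hq))
        (fun q hq => hO q (List.mem_cons_of_mem _ hq))
    · have hskb : (expP == some (i, l)) = false := by simpa using hsk
      have hc : d.contains i = false := by
        rw [hcont (i, l) List.mem_cons_self]; exact hskb
      have step : ∀ v : String, ∀ q ∈ rest, ((d.insert i v).contains q.1) = (expP == some q) := by
        intro v q hq
        rw [PySem.Dict.contains_insert]
        have hne : (q.1 == i) = false := by
          have : q.1 ≠ i := fun hh => hi (by rw [← hh]; exact List.mem_map_of_mem hq)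
          simpa using this
        rw [hne, Bool.false_or, hcont q (List.mem_cons_of_mem _ hq)]
      have tail := fun v => ih (d.insert i v) hnd' (step v)
        (fun q hq => hO q (List.mem_cons_of_mem _ hq))
      by_cases hl : l = "O"
      · subst hl
        simp only [pvPtrLoop, List.filterMap_cons, pvValPtr, hskb, hc, Bool.false_eq_true,
          if_false, if_true, BEq.rfl, Option.map_some, List.foldl_cons]
        exact tail "_"
      · have hlO : (l == "O") = false := by simpa using hl
        simp only [pvPtrLoop, List.filterMap_cons, pvValPtr, hskb, hlO, hc, Bool.false_eq_true,
          if_false, Option.map_some, List.foldl_cons]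
        rw [pvFmt_map expP l]
        exact tail (pvFmtP expP l)

-- main loop lemma, head_first/head_final branch
lemma pvHeadLoop_eq (expP targP holdP : Option (Int × String)) (ins : Bool) :
    ∀ (e : List (Int × String)) (d : PySem.Dict Int String),
      (e.map Prod.fst).Nodup →
      (∀ p ∈ e, d.contains p.1 = (expP == some p || targP == some p || holdP == some p)) →
      (∀ p ∈ e, (expP == some p || targP == some p || holdP == some p) = true → p.2 ≠ "O") →
      (expP = none → ∀ p ∈ e, PySem.Str.isIn "exp" (if ins then "IN:" ++ p.2 else p.2) = false) →
      (targP = none → ∀ p ∈ e, PySem.Str.isIn "targ" (if ins then "IN:" ++ p.2 else p.2) = false) →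
      (holdP = none → ∀ p ∈ e, PySem.Str.isIn "holder" (if ins then "IN:" ++ p.2 else p.2) = false) →
      pvHeadLoop (expP.map Prod.fst) (targP.map Prod.fst) (holdP.map Prod.fst) ins e d
        = (e.filterMap (fun p =>
            if expP == some p || targP == some p || holdP == some p then none
            else (pvValHead expP targP holdP ins p.2).map (fun v => (p.1, v)))).foldl
            (fun d p => d.insert p.1 p.2) d := by
  intro e
  induction e with
  | nil => intro d _ _ _ _ _ _; simp [pvHeadLoop]
  | cons p rest ih =>
    intro d hnd hcont hO hE hT hH
    obtain ⟨i, l⟩ := p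
    have hnd' : (rest.map Prod.fst).Nodup := (List.nodup_cons.mp (by simpa using hnd)).2
    have hi : (i : Int) ∉ rest.map Prod.fst := (List.nodup_cons.mp (by simpa using hnd)).1
    have ihrest : ∀ d' : PySem.Dict Int String,
        (∀ q ∈ rest, d'.contains q.1 = (expP == some q || targP == some q || holdP == some q)) →
        pvHeadLoop (expP.map Prod.fst) (targP.map Prod.fst) (holdP.map Prod.fst) ins rest d'
          = (rest.filterMap (fun p =>
              if expP == some p || targP == some p || holdP == some p then none
              else (pvValHead expP targP holdP ins p.2).map (fun v => (p.1, v)))).foldl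
              (fun d p => d.insert p.1 p.2) d' :=
      fun d' hc' => ih d' hnd' hc'
        (fun q hq => hO q (List.mem_cons_of_mem _ hq))
        (fun h q hq => hE h q (List.mem_cons_of_mem _ hq))
        (fun h q hq => hT h q (List.mem_cons_of_mem _ hq))
        (fun h q hq => hH h q (List.mem_cons_of_mem _ hq))
    by_cases hsk : (expP == some (i, l) || targP == some (i, l) || holdP == some (i, l)) = true
    · have hl : l ≠ "O" := hO (i, l) List.mem_cons_self hsk
      have hlO : (l == "O") = false := by simpa using hl
      have hc : d.contains i = true := by rw [hcont (i, l) List.mem_cons_self]; exact hsk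
      simp only [pvHeadLoop, List.filterMap_cons, hsk, hlO, hc, Bool.false_eq_true, if_false, if_true]
      exact ihrest d (fun q hq => hcont q (List.mem_cons_of_mem _ hq))
    · have hskb : (expP == some (i, l) || targP == some (i, l) || holdP == some (i, l)) = false :=
        by simpa using hsk
      have hc : d.contains i = false := by rw [hcont (i, l) List.mem_cons_self]; exact hskb
      have step : ∀ v : String, ∀ q ∈ rest,
          ((d.insert i v).contains q.1) = (expP == some q || targP == some q || holdP == some q) := by
        intro v q hq
        rw [PySem.Dict.contains_insert]
        have hne : (q.1 == i) = false := by
          have : q.1 ≠ i := fun hh => hi (by rw [← hh]; exact List.mem_map_of_mem hq)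
          simpa using this
        rw [hne, Bool.false_or, hcont q (List.mem_cons_of_mem _ hq)]
      have tail := fun v => ihrest (d.insert i v) (step v)
      by_cases hl : l = "O"
      · subst hl
        simp only [pvHeadLoop, List.filterMap_cons, pvValHead, pvFmtP, pvFmtO, hskb, hc,
          Bool.false_eq_true, if_false, if_true, BEq.rfl, Option.map_some, List.foldl_cons]
        have t := tail "_"
        simp only [pvValHead, pvFmtP, pvFmtO, Option.map_some] at t
        exact t
      · have hlO : (l == "O") = false := by simpa using hl
        by_cases he : PySem.Str.isIn "exp" (if ins then "IN:" ++ l else l) = true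
        · cases expP with
          | none => exact absurd (hE rfl (i, l) List.mem_cons_self) (by simpa using he)
          | some pe =>
            simp only [pvHeadLoop, List.filterMap_cons, pvValHead, pvFmtP, pvFmtO, hskb, hlO, hc,
              he, Bool.false_eq_true, if_false, if_true, Option.map_some, Option.isSome_some,
              Bool.and_true, List.foldl_cons]
            have t := tail (pvFmtP (some pe) (if ins then "IN:" ++ l else l))
            simp only [pvValHead, pvFmtP, pvFmtO, Option.map_some, Option.isSome_some,
              Bool.and_true] at t
            exact t
        · have heb : PySem.Str.isIn "exp" (if ins then "IN:" ++ l else l) = false := by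
            simpa using he
          by_cases ht : PySem.Str.isIn "targ" (if ins then "IN:" ++ l else l) = true
          · cases targP with
            | none => exact absurd (hT rfl (i, l) List.mem_cons_self) (by simpa using ht)
            | some pt =>
              simp only [pvHeadLoop, List.filterMap_cons, pvValHead, pvFmtP, pvFmtO, hskb, hlO,
                hc, heb, ht, Bool.false_eq_true, if_false, if_true, Option.map_some,
                Option.isSome_some, Bool.and_true, Bool.false_and, List.foldl_cons]
              have t := tail (pvFmtP (some pt) (if ins then "IN:" ++ l else l))
              simp only [pvValHead, pvFmtP, pvFmtO, Option.map_some, Option.isSome_some,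
                Bool.and_true] at t
              exact t
          · have htb : PySem.Str.isIn "targ" (if ins then "IN:" ++ l else l) = false := by
              simpa using ht
            by_cases hh : PySem.Str.isIn "holder" (if ins then "IN:" ++ l else l) = true
            · cases holdP with
              | none => exact absurd (hH rfl (i, l) List.mem_cons_self) (by simpa using hh)
              | some ph =>
                simp only [pvHeadLoop, List.filterMap_cons, pvValHead, pvFmtP, pvFmtO, hskb, hlO,
                  hc, heb, htb, hh, Bool.false_eq_true, if_false, if_true, Option.map_some,
                  Option.isSome_some, Bool.and_true, Bool.false_and, List.foldl_cons]
                have t := tail (pvFmtP (some ph) (if ins then "IN:" ++ l else l))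
                simp only [pvValHead, pvFmtP, pvFmtO, Option.map_some, Option.isSome_some,
                  Bool.and_true] at t
                exact t
            · have hhb : PySem.Str.isIn "holder" (if ins then "IN:" ++ l else l) = false := by
                simpa using hh
              simp only [pvHeadLoop, List.filterMap_cons, pvValHead, pvFmtP, pvFmtO, hskb, hlO,
                hc, heb, htb, hhb, Bool.false_eq_true, if_false, Bool.false_and,
                Option.map_none, List.foldl_cons]
              exact ihrest d (fun q hq => hcont q (List.mem_cons_of_mem _ hq))

-- inserting a dict's own items into an empty dict rebuilds it
lemma pvDictOfItems (d : PySem.Dict Int String) (h : d.keys.Nodup) :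
    d.items.foldl (fun d p => d.insert p.1 p.2) PySem.Dict.empty = d := by
  apply PySem.Dict.ext
  have hfresh : ∀ p ∈ d.items, (PySem.Dict.empty : PySem.Dict Int String).contains p.1 = false := by
    intro p _; simp
  have := PySem.Dict.items_foldl_insert_fresh (l := d.items) (k := Prod.fst) (v := Prod.snd)
    (d := (PySem.Dict.empty : PySem.Dict Int String)) hfresh (by simpa [PySem.Dict.keys] using h)
  simpa using this

-- ---- branch lemmas: A's loops = B's roots-dict + comprehension ----

lemma pvExpDict_nodup_keys (o : Option (Int × String)) : (pvExpDict o).keys.Nodup := by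
  cases o with
  | none => exact PySem.Dict.nodup_keys_empty
  | some p => exact PySem.Dict.nodup_keys_insert _ _ _ PySem.Dict.nodup_keys_empty

lemma pvKeyNotO {key : String} {e : List (Int × String)} {p : Int × String}
    (hk : key = "exp" ∨ key = "targ" ∨ key = "holder")
    (hf : pvAltFirst key e = some p) : p.2 ≠ "O" := by
  intro h2
  have := List.find?_some hf
  rw [h2] at this
  rcases hk with h | h | h <;> subst h <;> exact absurd (by simpa using this) (by decide)

lemma pvPtrBranch (e : List (Int × String)) (hnd : (e.map Prod.fst).Nodup) :
    (pvPtrLoop (pvExpLoop e PySem.Dict.empty).2 e (pvExpLoop e PySem.Dict.empty).1).items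
      = (((pvExpDict (pvAltFirst "exp" e)).items
          ++ e.filterMap (fun p =>
              if (pvExpDict (pvAltFirst "exp" e)).contains p.1 then none
              else (pvValPtr (pvAltFirst "exp" e) p.2).map (fun v => (p.1, v)))).foldl
          (fun d p => d.insert p.1 p.2) PySem.Dict.empty).items := by
  have hcontains : ∀ p ∈ e,
      (pvExpDict (pvAltFirst "exp" e)).contains p.1 = (pvAltFirst "exp" e == some p) := by
    intro p hp
    cases hf : pvAltFirst "exp" e with
    | none => simp [pvExpDict]
    | some pe =>
      simp only [pvExpDict, PySem.Dict.contains_insert, PySem.Dict.contains_empty, Bool.or_false]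
      exact pvBeqRoot hnd hp (List.mem_of_find?_eq_some hf)
  have hO : ∀ p ∈ e, (pvAltFirst "exp" e == some p) = true → p.2 ≠ "O" := by
    intro p hp h
    exact pvKeyNotO (key := "exp") (by tauto) (by simpa using h)
  have hloop := pvPtrLoop_eq (pvAltFirst "exp" e) e (pvExpDict (pvAltFirst "exp" e))
    hnd hcontains hO
  rw [pvExpLoop_eq, List.foldl_append, pvDictOfItems _ (pvExpDict_nodup_keys _),
    List.filterMap_congr (fun p hp => by rw [hcontains p hp]), ← hloop]
  cases hf : pvAltFirst "exp" e <;> simp [pvExpDict, pvFmtO, pvFmtP]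

lemma pvRootsDict_contains (e : List (Int × String)) (hnd : (e.map Prod.fst).Nodup)
    (expP targP holdP : Option (Int × String))
    (hEm : ∀ q, expP = some q → q ∈ e) (hTm : ∀ q, targP = some q → q ∈ e)
    (hHm : ∀ q, holdP = some q → q ∈ e) :
    ∀ p ∈ e, (pvRootsDict expP targP holdP).contains p.1
      = (expP == some p || targP == some p || holdP == some p) := by
  intro p hp
  cases expP with
  | none =>
    cases targP with
    | none =>
      cases holdP with
      | none => simp [pvRootsDict, pvExpDict, List.foldl]
      | some ph =>
        simp only [pvRootsDict, pvExpDict, List.foldl, PySem.Dict.contains_insert,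
          PySem.Dict.contains_empty, Bool.or_false]
        rw [pvBeqRoot hnd hp (hHm ph rfl)]
        simp
    | some pt =>
      cases holdP with
      | none =>
        simp only [pvRootsDict, pvExpDict, List.foldl, PySem.Dict.contains_insert,
          PySem.Dict.contains_empty, Bool.or_false]
        rw [pvBeqRoot hnd hp (hTm pt rfl)]
        simp
      | some ph =>
        simp only [pvRootsDict, pvExpDict, List.foldl, PySem.Dict.contains_insert,
          PySem.Dict.contains_empty, Bool.or_false]
        rw [pvBeqRoot hnd hp (hHm ph rfl), pvBeqRoot hnd hp (hTm pt rfl)]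
        cases h1 : ((some pt : Option (Int × String)) == some p) <;>
          cases h2 : ((some ph : Option (Int × String)) == some p) <;> simp [h1, h2]
  | some pe =>
    cases targP with
    | none =>
      cases holdP with
      | none =>
        simp only [pvRootsDict, pvExpDict, List.foldl, PySem.Dict.contains_insert,
          PySem.Dict.contains_empty, Bool.or_false]
        rw [pvBeqRoot hnd hp (hEm pe rfl)]
        simp
      | some ph =>
        simp only [pvRootsDict, pvExpDict, List.foldl, PySem.Dict.contains_insert,
          PySem.Dict.contains_empty, Bool.or_false]
        rw [pvBeqRoot hnd hp (hHm ph rfl), pvBeqRoot hnd hp (hEm pe rfl)]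
        cases h1 : ((some pe : Option (Int × String)) == some p) <;>
          cases h2 : ((some ph : Option (Int × String)) == some p) <;> simp [h1, h2]
    | some pt =>
      cases holdP with
      | none =>
        simp only [pvRootsDict, pvExpDict, List.foldl, PySem.Dict.contains_insert,
          PySem.Dict.contains_empty, Bool.or_false]
        rw [pvBeqRoot hnd hp (hTm pt rfl), pvBeqRoot hnd hp (hEm pe rfl)]
        cases h1 : ((some pe : Option (Int × String)) == some p) <;>
          cases h2 : ((some pt : Option (Int × String)) == some p) <;> simp [h1, h2]
      | some ph =>
        simp only [pvRootsDict, pvExpDict, List.foldl, PySem.Dict.contains_insert,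
          PySem.Dict.contains_empty, Bool.or_false]
        rw [pvBeqRoot hnd hp (hHm ph rfl), pvBeqRoot hnd hp (hTm pt rfl),
          pvBeqRoot hnd hp (hEm pe rfl)]
        cases h1 : ((some pe : Option (Int × String)) == some p) <;>
          cases h2 : ((some pt : Option (Int × String)) == some p) <;>
          cases h3 : ((some ph : Option (Int × String)) == some p) <;> simp [h1, h2, h3]

lemma pvRootsDict_nodup_keys (expP targP holdP : Option (Int × String)) :
    (pvRootsDict expP targP holdP).keys.Nodup := by
  cases expP <;> cases targP <;> cases holdP <;>
    simp only [pvRootsDict, pvExpDict, List.foldl] <;>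
    first
    | exact PySem.Dict.nodup_keys_empty
    | (repeat apply PySem.Dict.nodup_keys_insert)
      exact PySem.Dict.nodup_keys_empty

lemma pvHeadBranch (e : List (Int × String)) (hnd : (e.map Prod.fst).Nodup) (ins : Bool) :
    (pvHeadLoop (pvExpLoop e PySem.Dict.empty).2
        (pvTargLoop (pvExpLoop e PySem.Dict.empty).2 e (pvExpLoop e PySem.Dict.empty).1).2
        (pvHolderLoop (pvExpLoop e PySem.Dict.empty).2 e
          (pvTargLoop (pvExpLoop e PySem.Dict.empty).2 e (pvExpLoop e PySem.Dict.empty).1).1).2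
        ins e
        (pvHolderLoop (pvExpLoop e PySem.Dict.empty).2 e
          (pvTargLoop (pvExpLoop e PySem.Dict.empty).2 e (pvExpLoop e PySem.Dict.empty).1).1).1).items
      = (((pvRootsDict (pvAltFirst "exp" e) (pvAltFirst "targ" e) (pvAltFirst "holder" e)).items
          ++ e.filterMap (fun p =>
              if (pvRootsDict (pvAltFirst "exp" e) (pvAltFirst "targ" e) (pvAltFirst "holder" e)).contains p.1
              then none
              else (pvValHead (pvAltFirst "exp" e) (pvAltFirst "targ" e) (pvAltFirst "holder" e) ins p.2).map
                (fun v => (p.1, v)))).foldl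
          (fun d p => d.insert p.1 p.2) PySem.Dict.empty).items := by
  have hEm : ∀ q, pvAltFirst "exp" e = some q → q ∈ e := fun q hq => List.mem_of_find?_eq_some hq
  have hTm : ∀ q, pvAltFirst "targ" e = some q → q ∈ e := fun q hq => List.mem_of_find?_eq_some hq
  have hHm : ∀ q, pvAltFirst "holder" e = some q → q ∈ e := fun q hq => List.mem_of_find?_eq_some hq
  have hcontains := pvRootsDict_contains e hnd _ _ _ hEm hTm hHm
  have hO : ∀ p ∈ e,
      (pvAltFirst "exp" e == some p || pvAltFirst "targ" e == some p
        || pvAltFirst "holder" e == some p) = true → p.2 ≠ "O" := by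
    intro p hp h
    simp only [Bool.or_eq_true] at h
    rcases h with (h | h) | h
    · exact pvKeyNotO (key := "exp") (by tauto) (by simpa using h)
    · exact pvKeyNotO (key := "targ") (by tauto) (by simpa using h)
    · exact pvKeyNotO (key := "holder") (by tauto) (by simpa using h)
  have hE := fun h => pvFirst_none (e := e) (key := "exp") h (by tauto) ins
  have hT := fun h => pvFirst_none (e := e) (key := "targ") h (by tauto) ins
  have hH := fun h => pvFirst_none (e := e) (key := "holder") h (by tauto) ins
  have hloop := pvHeadLoop_eq (pvAltFirst "exp" e) (pvAltFirst "targ" e) (pvAltFirst "holder" e)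
    ins e (pvRootsDict (pvAltFirst "exp" e) (pvAltFirst "targ" e) (pvAltFirst "holder" e))
    hnd hcontains hO hE hT hH
  rw [pvExpLoop_eq, pvTargLoop_eq, pvHolderLoop_eq, List.foldl_append,
    pvDictOfItems _ (pvRootsDict_nodup_keys _ _ _),
    List.filterMap_congr (fun p hp => by rw [hcontains p hp]), ← hloop]
  cases hfE : pvAltFirst "exp" e <;> cases hfT : pvAltFirst "targ" e <;>
    cases hfH : pvAltFirst "holder" e <;>
    simp [pvRootsDict, pvExpDict, List.foldl, pvFmtO, pvFmtP]

-- token ids 1..n are distinct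
lemma pvEnumNodup0 (labels : List String) :
    (((PySem.List.enumerate labels).map (fun p => (p.1 + 1, p.2))).map Prod.fst).Nodup := by
  rw [List.map_map]
  have hpw := PySem.List.pairwise_lt_enumerate (xs := labels) (s := 0)
  have h1 : ((PySem.List.enumerate labels 0).map (Prod.fst ∘ fun p => (p.1 + 1, p.2))).Pairwise
      (· < ·) :=
    List.Pairwise.map _ (by intro a b hab; simpa using (by omega : a.1 + 1 < b.1 + 1)) hpw
  exact h1.imp (fun hab => ne_of_lt hab)

lemma pvEnumNodupRev (labels : List String) :
    ((((PySem.List.enumerate labels).map (fun p => (p.1 + 1, p.2))).reverse).map Prod.fst).Nodup := by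
  rw [List.map_reverse]
  exact List.nodup_reverse.mpr (pvEnumNodup0 labels)

theorem pv_main (labels : List String) (setup : String) (inside_label : Bool) :
    create_sentiment_dict labels setup inside_label
      = create_sentiment_dict_alt labels setup inside_label := by
  by_cases hs : (setup == "point_to_root") = true
  · simp only [create_sentiment_dict, create_sentiment_dict_alt, hs, if_true, Bool.true_or]
    rw [pvAnchors_last "exp" (by tauto), ← List.filterMap_reverse]
    exact pvPtrBranch _ (pvEnumNodupRev labels)
  · have hsf : (setup == "point_to_root") = false := by simpa using hs
    by_cases hf : (setup == "head_final") = true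
    · simp only [create_sentiment_dict, create_sentiment_dict_alt, hsf, hf, Bool.false_or,
        Bool.false_eq_true, if_false, if_true]
      rw [pvAnchors_last "exp" (by tauto), pvAnchors_last "targ" (by tauto),
        pvAnchors_last "holder" (by tauto), ← List.filterMap_reverse]
      exact pvHeadBranch _ (pvEnumNodupRev labels) inside_label
    · have hff : (setup == "head_final") = false := by simpa using hf
      simp only [create_sentiment_dict, create_sentiment_dict_alt, hsf, hff, Bool.false_or,
        Bool.false_eq_true, if_false]
      rw [pvAnchors_first "exp" (by tauto), pvAnchors_first "targ" (by tauto),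
        pvAnchors_first "holder" (by tauto)]
      exact pvHeadBranch _ (pvEnumNodup0 labels) inside_label

-- ===== VERDICT (by name: the statement is the Claim_ definition above) =====
theorem create_sentiment_dict_spec : Claim_equal_create_sentiment_dict := by
  intro labels setup inside_label _hdom _hpre
  unfold Spec_create_sentiment_dict
  exact pv_main labels setup inside_label
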